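-- pv_equiv track=rewrite | github.com/zq9bq6rtzb-design/AetherLife | AetherLife _LifeCore.py | adjust_d_model
-- ===== SOURCE A (Python) =====
-- def adjust_d_model(d_model: int, nhead: int, lower: int = 64, upper: int = 256) -> int:
--     if nhead <= 0:
--         raise ValueError('nhead must be positive')
--     lower = max(lower, nhead)
--     first_multiple = ((lower + nhead - 1) // nhead) * nhead
--     candidates = []
--     multiple = first_multiple
--     while multiple <= upper:
--         candidates.append(multiple)
--         multiple += nhead
--     candidates.sort(key=lambda x: abs(x - d_model))
--     for cand in candidates:
--         if ((cand // nhead) % 2) == 0: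
--             return cand
--     return candidates[0] if candidates else lower
-- ===== SOURCE B (Python) =====
-- def adjust_d_model(d_model: int, nhead: int, lower: int = 64, upper: int = 256) -> int:
--     if nhead <= 0:
--         raise ValueError('nhead must be positive')
--     lo = max(lower, nhead)
--     q0 = -((-lo) // nhead)          # ceil(lo / nhead)
--     q1 = upper // nhead             # floor(upper / nhead)
--     best_even = None                # (dist, cand) with even quotient
--     nearest = None                  # (dist, cand) overall
--     for q in range(q0, q1 + 1):
--         cand = q * nhead
--         dist = abs(cand - d_model)
--         if nearest is None or dist < nearest[0]:
--             nearest = (dist, cand)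
--         if q % 2 == 0 and (best_even is None or dist < best_even[0]):
--             best_even = (dist, cand)
--     if best_even is not None:
--         return best_even[1]
--     if nearest is not None:
--         return nearest[1]
--     return lo
-- ===== Notes on version B (the rewrite author's own statement) =====
-- stated objective: alternative
-- what changed: A materialises every candidate multiple, stable-sorts the list by distance to d_model and scans it twice; B makes a single pass over the quotient range tracking two running minima (first-minimal even-quotient candidate and first-minimal overall), building no list and sorting nothing (O(k) pass vs O(k log k) sort, k = candidate count; not measurable on the timed inputs since k is bounded by the fixed [lower,upper] range).
import Mathlib
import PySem

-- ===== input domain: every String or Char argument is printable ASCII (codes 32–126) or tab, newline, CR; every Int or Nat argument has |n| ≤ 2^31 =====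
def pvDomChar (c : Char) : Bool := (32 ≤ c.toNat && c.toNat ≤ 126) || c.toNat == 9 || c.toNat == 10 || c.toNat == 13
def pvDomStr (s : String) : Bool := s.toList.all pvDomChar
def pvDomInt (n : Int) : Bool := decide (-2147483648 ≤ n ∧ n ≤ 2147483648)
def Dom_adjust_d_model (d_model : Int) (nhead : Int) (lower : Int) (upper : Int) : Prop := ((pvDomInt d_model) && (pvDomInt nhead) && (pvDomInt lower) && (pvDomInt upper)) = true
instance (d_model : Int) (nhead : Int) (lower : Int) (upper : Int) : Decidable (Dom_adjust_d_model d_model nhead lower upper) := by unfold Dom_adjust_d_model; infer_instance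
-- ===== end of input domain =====

-- B replaces A's build-list + stable-sort-by-distance + scan with a single pass over the
-- quotient range that tracks two running minima (no list, no sort); objective: alternative.

-- ===== PORT A =====
-- the 'while multiple <= upper: candidates.append(multiple); multiple += nhead' loop
-- (tail-recursive with an accumulator so the port evaluates on large ranges;
--  the '0 < nhead' conjunct is only a totality guard: the loop is reached only when nhead > 0)
def adjBuild (upper : Int) (nhead : Int) (acc : List Int) (multiple : Int) : List Int :=
  if h : 0 < nhead ∧ multiple ≤ upper then adjBuild upper nhead (acc ++ [multiple]) (multiple + nhead)
  else acc
termination_by (upper + 1 - multiple).toNat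
decreasing_by omega

-- Python's stable sort by key: a stable insertion sort, written tail-recursively so the
-- port evaluates deep; proven equal to the PySem model of sorted (sortTR_eq_sorted below)
def insertTR (key : Int → Int) (x : Int) : List Int → List Int → List Int
  | acc, [] => acc.reverse ++ [x]
  | acc, y :: ys => if key x < key y then acc.reverse ++ x :: y :: ys else insertTR key x (y :: acc) ys

def sortTR (key : Int → Int) (xs : List Int) : List Int := xs.foldl (fun acc x => insertTR key x [] acc) []

def adjust_d_model (d_model : Int) (nhead : Int) (lower : Int) (upper : Int) : Int :=
  if nhead ≤ 0 then 0  -- Python raises ValueError here; excluded by Pre_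
  else
    let lower' := max lower nhead
    let first_multiple := (PySem.Int.floordiv (lower' + nhead - 1) nhead) * nhead
    let candidates := adjBuild upper nhead [] first_multiple
    let sortedC := sortTR (fun x => |x - d_model|) candidates
    match sortedC.find? (fun c => PySem.Int.mod (PySem.Int.floordiv c nhead) 2 == 0) with
    | some c => c
    | none =>
      match sortedC with
      | c :: _ => c
      | [] => lower'

-- ===== PORT B =====
-- 'if acc is None or dist < acc[0]: acc = (dist, cand)'
def bUpd (d_model : Int) (acc : Option (Int × Int)) (cand : Int) : Option (Int × Int) :=
  let dist := |cand - d_model|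
  match acc with
  | none => some (dist, cand)
  | some (bd, bc) => if dist < bd then some (dist, cand) else some (bd, bc)

def adjust_d_model_alt (d_model : Int) (nhead : Int) (lower : Int) (upper : Int) : Int :=
  if nhead ≤ 0 then 0  -- Python raises ValueError here; excluded by Pre_
  else
    let lo := max lower nhead
    let q0 := -(PySem.Int.floordiv (-lo) nhead)
    let q1 := PySem.Int.floordiv upper nhead
    let st := (PySem.List.pyRange q0 (q1 + 1) 1).foldl
      (fun (acc : Option (Int × Int) × Option (Int × Int)) q =>
        ((if PySem.Int.mod q 2 == 0 then bUpd d_model acc.1 (q * nhead) else acc.1),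
         bUpd d_model acc.2 (q * nhead)))
      (none, none)
    match st.1 with
    | some (_, c) => c
    | none =>
      match st.2 with
      | some (_, c) => c
      | none => lo

-- ===== PRECONDITION & SPEC =====
-- Python A raises ValueError exactly when nhead <= 0; Pre_ excludes only those inputs.
def Pre_adjust_d_model (d_model : Int) (nhead : Int) (lower : Int) (upper : Int) : Prop := 0 < nhead
instance (d_model : Int) (nhead : Int) (lower : Int) (upper : Int) : Decidable (Pre_adjust_d_model d_model nhead lower upper) := by unfold Pre_adjust_d_model; infer_instance

def pvWitness_adjust_d_model : Int × Int × Int × Int := (128, 4, 64, 256)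

def Spec_adjust_d_model (d_model : Int) (nhead : Int) (lower : Int) (upper : Int) (out : Int) : Prop := out = adjust_d_model_alt d_model nhead lower upper
instance (d_model : Int) (nhead : Int) (lower : Int) (upper : Int) (out : Int) : Decidable (Spec_adjust_d_model d_model nhead lower upper out) := by unfold Spec_adjust_d_model; infer_instance

-- ===== CLAIM (what is proved, stated in full; the proofs are below) =====
def Claim_equal_adjust_d_model : Prop := ∀ (d_model : Int) (nhead : Int) (lower : Int) (upper : Int), Dom_adjust_d_model d_model nhead lower upper → Pre_adjust_d_model d_model nhead lower upper → Spec_adjust_d_model d_model nhead lower upper (adjust_d_model d_model nhead lower upper)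

-- ===== LEMMAS AND PROOFS =====

-- first-minimum selector: the abstract content of B's running-minimum accumulator
def selStep (key : Int → Int) (acc : Option Int) (x : Int) : Option Int :=
  match acc with
  | none => some x
  | some b => if key x < key b then some x else some b

def selFirstMin (key : Int → Int) (l : List Int) : Option Int := l.foldl (selStep key) none

theorem foldl_selStep_keep (key : Int → Int) (m : Int) (l : List Int)
    (h : ∀ y ∈ l, ¬ key y < key m) : l.foldl (selStep key) (some m) = some m := by
  induction l with
  | nil => rfl
  | cons x l ih =>
    have hx := h x (by simp)
    simp only [List.foldl_cons, selStep, if_neg hx]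
    exact ih (fun y hy => h y (by simp [hy]))

theorem foldl_selStep_mem (key : Int → Int) (l : List Int) :
    ∀ b : Int, ∃ c, l.foldl (selStep key) (some b) = some c ∧ (c = b ∨ c ∈ l) := by
  induction l with
  | nil => exact fun b => ⟨b, rfl, Or.inl rfl⟩
  | cons x l ih =>
    intro b
    simp only [List.foldl_cons, selStep]
    by_cases hx : key x < key b
    · obtain ⟨c, hc, hmem⟩ := ih x
      exact ⟨c, by simp [if_pos hx, hc], by rcases hmem with h | h <;> simp [h]⟩
    · obtain ⟨c, hc, hmem⟩ := ih b
      exact ⟨c, by simp [if_neg hx, hc], by rcases hmem with h | h <;> simp [h]⟩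

theorem selFirstMin_spec (key : Int → Int) (l₁ l₂ : List Int) (m : Int)
    (h₁ : ∀ y ∈ l₁, key m < key y) (h₂ : ∀ y ∈ l₂, ¬ key y < key m) :
    selFirstMin key (l₁ ++ m :: l₂) = some m := by
  unfold selFirstMin
  cases l₁ with
  | nil =>
    simp only [List.nil_append, List.foldl_cons, selStep]
    exact foldl_selStep_keep key m l₂ h₂
  | cons x l₁ =>
    rw [List.foldl_append]
    obtain ⟨c, hc, hmem⟩ := foldl_selStep_mem key l₁ x
    have hcl : c ∈ x :: l₁ := by rcases hmem with h | h <;> simp [h]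
    simp only [List.foldl_cons, selStep] at hc ⊢
    rw [hc]
    have : key m < key c := h₁ c hcl
    simp only [if_pos this]
    exact foldl_selStep_keep key m l₂ h₂

theorem selFirstMin_eq_none_iff (key : Int → Int) (l : List Int) :
    selFirstMin key l = none ↔ l = [] := by
  cases l with
  | nil => simp [selFirstMin]
  | cons x l =>
    simp only [selFirstMin, List.foldl_cons, selStep]
    obtain ⟨c, hc, _⟩ := foldl_selStep_mem key l x
    simp [hc]

-- stability of PySem's insertion sort, filtered to one key class
theorem filter_insertBy (key : Int → Int) (k0 x : Int) (ys : List Int)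
    (hys : ys.Pairwise (fun a b => key a ≤ key b)) :
    (PySem.List.insertBy (fun a b => decide (key a < key b)) x ys).filter (fun z => decide (key z = k0))
      = ys.filter (fun z => decide (key z = k0)) ++ List.filter (fun z => decide (key z = k0)) [x] := by
  induction ys with
  | nil => simp [PySem.List.insertBy]
  | cons y ys ih =>
    obtain ⟨hy, hys'⟩ := List.pairwise_cons.mp hys
    by_cases hxy : key x < key y
    · rw [show PySem.List.insertBy (fun a b => decide (key a < key b)) x (y :: ys)
          = x :: y :: ys by simp [PySem.List.insertBy, hxy]]
      by_cases hx : key x = k0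
      · have hnil : (y :: ys).filter (fun z => decide (key z = k0)) = [] := by
          rw [List.filter_eq_nil_iff]
          intro z hz
          have hyz : key y ≤ key z := by
            rcases List.mem_cons.mp hz with h | h
            · rw [h]
            · exact hy z h
          simp only [decide_eq_true_eq]
          omega
        simp [hnil, hx]
      · simp [List.filter_cons, hx]
    · rw [show PySem.List.insertBy (fun a b => decide (key a < key b)) x (y :: ys)
          = y :: PySem.List.insertBy (fun a b => decide (key a < key b)) x ys by
            simp [PySem.List.insertBy, hxy]]
      rw [List.filter_cons, List.filter_cons, ih hys']
      by_cases hyk : key y = k0 <;> simp [hyk]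

theorem filter_sorted_stable (key : Int → Int) (k0 : Int) (xs : List Int) :
    (PySem.List.sorted xs key false).filter (fun z => decide (key z = k0))
      = xs.filter (fun z => decide (key z = k0)) := by
  induction xs using List.reverseRecOn with
  | nil => rfl
  | append_singleton xs x ih =>
    have hstep : PySem.List.sorted (xs ++ [x]) key false
        = PySem.List.insertBy (fun a b => decide (key a < key b)) x (PySem.List.sorted xs key false) := by
      rw [PySem.List.sorted_eq_foldl_insertBy, PySem.List.sorted_eq_foldl_insertBy, List.foldl_append]
      rfl
    rw [hstep, filter_insertBy key k0 x _ (PySem.List.sorted_pairwise xs key),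
        ih, List.filter_append]

-- A's "scan the stable distance-sorted list for the first hit" equals B's
-- "first minimum over the filtered original (increasing) list"
theorem find?_sorted_eq_selFirstMin (key : Int → Int) (p : Int → Bool) (l : List Int)
    (hl : l.Pairwise (· < ·)) :
    (PySem.List.sorted l key false).find? p = selFirstMin key (l.filter p) := by
  by_cases hfp : l.filter p = []
  · rw [hfp]
    have : ∀ x ∈ PySem.List.sorted l key false, ¬ p x = true := by
      intro x hx
      have hxl : x ∈ l := (PySem.List.mem_sorted l key false x).mp hx
      intro hpx
      have : x ∈ l.filter p := List.mem_filter.mpr ⟨hxl, hpx⟩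
      simp [hfp] at this
    rw [List.find?_eq_none.mpr this]
    rfl
  · -- find? is some: there is a p-element
    obtain ⟨x, hxF⟩ := List.exists_mem_of_ne_nil _ hfp
    obtain ⟨hxl, hpx⟩ := List.mem_filter.mp hxF
    have hxs : x ∈ PySem.List.sorted l key false := (PySem.List.mem_sorted l key false x).mpr hxl
    obtain ⟨r, hr⟩ : ∃ r, (PySem.List.sorted l key false).find? p = some r := by
      rcases h : (PySem.List.sorted l key false).find? p with _ | r
      · exact absurd hpx (List.find?_eq_none.mp h x hxs)
      · exact ⟨r, rfl⟩
    obtain ⟨hpr, s₁, s₂, hsplit, hns₁⟩ := List.find?_eq_some_iff_append.mp hr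
    have hrl : r ∈ l := by
      have : r ∈ PySem.List.sorted l key false := by rw [hsplit]; simp
      exact (PySem.List.mem_sorted l key false r).mp this
    -- minimality of key r among p-elements of l
    have hkmin : ∀ y ∈ l, p y = true → key r ≤ key y := by
      intro y hyl hpy
      have hys : y ∈ PySem.List.sorted l key false := (PySem.List.mem_sorted l key false y).mpr hyl
      rw [hsplit] at hys
      rcases List.mem_append.mp hys with h1 | h2
      · exact absurd hpy (by simpa using hns₁ y h1)
      · rcases List.mem_cons.mp h2 with h | h
        · rw [h]
        · have hpair := PySem.List.sorted_pairwise l key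
          rw [hsplit] at hpair
          have := (List.pairwise_append.mp hpair).2.1
          exact (List.pairwise_cons.mp this).1 y h
    have hnodup : l.Nodup := hl.imp (fun h => ne_of_lt h)
    have hFsub : (l.filter p).Sublist l := List.filter_sublist
    have hFpair : (l.filter p).Pairwise (· < ·) := hl.sublist hFsub
    have hrF : r ∈ l.filter p := List.mem_filter.mpr ⟨hrl, hpr⟩
    obtain ⟨l₁, l₂, hF⟩ := List.append_of_mem hrF
    have h₂ : ∀ y ∈ l₂, ¬ key y < key r := by
      intro y hy
      have hyF : y ∈ l.filter p := by rw [hF]; simp [hy]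
      obtain ⟨hyl, hpy⟩ := List.mem_filter.mp hyF
      have := hkmin y hyl hpy
      omega
    have h₁ : ∀ y ∈ l₁, key r < key y := by
      intro y hy
      have hyF : y ∈ l.filter p := by rw [hF]; simp [hy]
      obtain ⟨hyl, hpy⟩ := List.mem_filter.mp hyF
      have hle : key r ≤ key y := hkmin y hyl hpy
      rcases lt_or_eq_of_le hle with h | heq
      · exact h
      -- equal keys: stability forces r before y in sorted order, but y precedes r in l
      · exfalso
        have hyr : y < r := by
          have := hFpair
          rw [hF] at this
          have := (List.pairwise_append.mp this).2.2 y hy r (by simp)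
          exact this
        have hys₂ : y ∈ s₂ := by
          have hys : y ∈ PySem.List.sorted l key false := (PySem.List.mem_sorted l key false y).mpr hyl
          rw [hsplit] at hys
          rcases List.mem_append.mp hys with h1 | h2
          · exact absurd hpy (by simpa using hns₁ y h1)
          · rcases List.mem_cons.mp h2 with h | h
            · omega
            · exact h
        -- the key-class filter of the sorted list equals that of l
        have hstab := filter_sorted_stable key (key r) l
        rw [hsplit] at hstab
        have hqy : (fun z => decide (key z = key r)) y = true := by simp [heq]
        rw [List.filter_append, List.filter_cons,
            if_pos (by simp : decide (key r = key r) = true)] at hstab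
        -- G := filter over l is strictly increasing; but r precedes y in it
        have hGpair : (l.filter (fun z => decide (key z = key r))).Pairwise (· < ·) :=
          hl.sublist List.filter_sublist
        rw [← hstab] at hGpair
        have hyG : y ∈ s₂.filter (fun z => decide (key z = key r)) :=
          List.mem_filter.mpr ⟨hys₂, hqy⟩
        have := (List.pairwise_append.mp hGpair).2.1
        have hry : r < y := (List.pairwise_cons.mp this).1 y hyG
        omega
    rw [hr, hF]
    exact (selFirstMin_spec key l₁ l₂ r h₁ h₂).symm

-- B's running-minimum fold computes selFirstMin of the mapped list
theorem foldl_bUpd_eq (d n : Int) (l : List Int) :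
    ∀ acc : Option Int,
      l.foldl (fun a q => bUpd d a (q * n)) (acc.map (fun m => (|m - d|, m)))
        = ((l.map (· * n)).foldl (selStep (fun x => |x - d|)) acc).map (fun m => (|m - d|, m)) := by
  induction l with
  | nil => intro acc; rfl
  | cons q l ih =>
    intro acc
    have hstep : bUpd d (acc.map (fun m => (|m - d|, m))) (q * n)
        = (selStep (fun x => |x - d|) acc (q * n)).map (fun m => (|m - d|, m)) := by
      cases acc with
      | none => rfl
      | some b =>
        simp only [Option.map_some, bUpd, selStep]
        by_cases h : |q * n - d| < |b - d| <;> simp [h]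
    simp only [List.map_cons, List.foldl_cons, hstep]
    exact ih (selStep (fun x => |x - d|) acc (q * n))

theorem foldl_bUpd_none (d n : Int) (l : List Int) :
    l.foldl (fun a q => bUpd d a (q * n)) none
      = (selFirstMin (fun x => |x - d|) (l.map (· * n))).map (fun m => (|m - d|, m)) :=
  foldl_bUpd_eq d n l none

-- the tail-recursive insert equals PySem's insertBy
theorem insertTR_eq_insertBy (key : Int → Int) (x : Int) :
    ∀ (l acc : List Int),
      insertTR key x acc l = acc.reverse ++ PySem.List.insertBy (fun a b => decide (key a < key b)) x l := by
  intro l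
  induction l with
  | nil => intro acc; simp [insertTR, PySem.List.insertBy]
  | cons y ys ih =>
    intro acc
    by_cases h : key x < key y
    · simp [insertTR, PySem.List.insertBy, h]
    · simp only [insertTR, if_neg h, ih (y :: acc),
        show PySem.List.insertBy (fun a b => decide (key a < key b)) x (y :: ys)
          = y :: PySem.List.insertBy (fun a b => decide (key a < key b)) x ys by
            simp [PySem.List.insertBy, h]]
      simp

theorem sortTR_eq_sorted (key : Int → Int) (xs : List Int) :
    sortTR key xs = PySem.List.sorted xs key false := by
  rw [sortTR, PySem.List.sorted_eq_foldl_insertBy]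
  apply PySem.List.foldl_congr_mem
  intro acc x _
  simpa using insertTR_eq_insertBy key x acc []

-- arithmetic: ceil division two ways
theorem ceil_fdiv (a n : Int) (hn : 0 < n) :
    PySem.Int.floordiv (a + n - 1) n = -(PySem.Int.floordiv (-a) n) := by
  unfold PySem.Int.floordiv
  rw [Int.fdiv_eq_ediv, Int.fdiv_eq_ediv]
  simp only [if_pos (Or.inl hn.le), sub_zero]
  have h1 : (-a) / n * n ≤ -a := Int.ediv_mul_le (-a) (by omega)
  have h2 : -a < ((-a) / n + 1) * n := by
    have := (Int.ediv_lt_iff_lt_mul hn).mp (lt_add_one ((-a) / n))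
    exact this
  set e := (-a) / n with he
  have hEn2 : -a < e * n + n := by nlinarith [h2]
  have h3 : -e ≤ (a + n - 1) / n := by
    rw [Int.le_ediv_iff_mul_le hn]
    nlinarith [hEn2]
  have h4 : (a + n - 1) / n < -e + 1 := by
    rw [Int.ediv_lt_iff_lt_mul hn]
    nlinarith [h1]
  omega

theorem le_fdiv_iff (up n q : Int) (hn : 0 < n) :
    q * n ≤ up ↔ q ≤ PySem.Int.floordiv up n := by
  unfold PySem.Int.floordiv
  rw [Int.fdiv_eq_ediv]
  simp only [if_pos (Or.inl hn.le), sub_zero]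
  exact (Int.le_ediv_iff_mul_le hn).symm

-- A's while loop builds exactly the multiples q*n for q in [q0, q1]
theorem adjBuild_eq (up n : Int) (hn : 0 < n) (q : Int) (acc : List Int) :
    adjBuild up n acc (q * n) = acc ++ (PySem.List.pyRange q (PySem.Int.floordiv up n + 1) 1).map (· * n) := by
  set q1 := PySem.Int.floordiv up n with hq1
  have H : ∀ (k : Nat) (q : Int) (acc : List Int), (q1 + 1 - q).toNat = k →
      adjBuild up n acc (q * n) = acc ++ (PySem.List.pyRange q (q1 + 1) 1).map (· * n) := by
    intro k
    induction k with
    | zero =>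
      intro q acc hk
      have hq : q1 + 1 ≤ q := by omega
      have hnle : ¬ q * n ≤ up := by
        intro h
        have := (le_fdiv_iff up n q hn).mp h
        omega
      rw [adjBuild, dif_neg (by tauto), PySem.List.pyRange_one_eq_nil hq]
      simp
    | succ k ih =>
      intro q acc hk
      have hq : q ≤ q1 := by omega
      have hle : q * n ≤ up := (le_fdiv_iff up n q hn).mpr hq
      rw [adjBuild, dif_pos ⟨hn, hle⟩, PySem.List.pyRange_one_cons (by omega : q < q1 + 1)]
      have harg : q * n + n = (q + 1) * n := by ring
      rw [harg, ih (q + 1) (acc ++ [q * n]) (by omega)]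
      simp
  exact H _ q acc rfl

-- the quotient-side even test matches A's cand-side even test
theorem even_test_eq (n q : Int) (hn : 0 < n) :
    (PySem.Int.mod (PySem.Int.floordiv (q * n) n) 2 == 0) = (PySem.Int.mod q 2 == 0) := by
  unfold PySem.Int.floordiv
  rw [Int.mul_fdiv_cancel q (by omega)]

-- ===== VERDICT (by name: the statement is the Claim_ definition above) =====
theorem adjust_d_model_spec : Claim_equal_adjust_d_model := by
  intro d n lo up _ hpre
  have hpre' : (0 : Int) < n := hpre
  unfold Spec_adjust_d_model adjust_d_model adjust_d_model_alt
  have hn0 : ¬ n ≤ 0 := by omega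
  dsimp only
  rw [if_neg hn0, if_neg hn0]
  set lo' := max lo n with hlo'
  set q0 := -(PySem.Int.floordiv (-lo') n) with hq0
  set q1 := PySem.Int.floordiv up n with hq1
  set key : Int → Int := fun x => |x - d| with hkey
  set Q := PySem.List.pyRange q0 (q1 + 1) 1 with hQ
  set L := Q.map (· * n) with hL
  -- A's candidate list is L
  have hfm : PySem.Int.floordiv (lo' + n - 1) n = q0 := ceil_fdiv lo' n hpre'
  have hcand : adjBuild up n [] (PySem.Int.floordiv (lo' + n - 1) n * n) = L := by
    rw [hfm]
    simpa using adjBuild_eq up n hpre' q0 []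
  have hQpair : Q.Pairwise (· < ·) := PySem.List.pairwise_lt_pyRange_one q0 (q1 + 1)
  have hLpair : L.Pairwise (· < ·) := by
    refine List.Pairwise.map _ ?_ hQpair
    intro a b hab
    exact mul_lt_mul_of_pos_right hab hpre'
  -- A's find? in terms of selFirstMin
  set p : Int → Bool := fun c => PySem.Int.mod (PySem.Int.floordiv c n) 2 == 0 with hp
  have hfind := find?_sorted_eq_selFirstMin key p L hLpair
  have hhead := find?_sorted_eq_selFirstMin key (fun _ => true) L hLpair
  rw [List.filter_true] at hhead
  -- B's fold in terms of selFirstMin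
  rw [PySem.List.foldl_prod_mk
        (f := fun a q => if PySem.Int.mod q 2 == 0 then bUpd d a (q * n) else a)
        (g := fun a q => bUpd d a (q * n)),
      PySem.List.foldl_if_eq_foldl_filter (fun q => PySem.Int.mod q 2 == 0)
        (fun a q => bUpd d a (q * n)),
      foldl_bUpd_none d n, foldl_bUpd_none d n]
  -- the filtered mapped list is L.filter p
  have hfilt : (Q.filter (fun q => PySem.Int.mod q 2 == 0)).map (· * n) = L.filter p := by
    rw [hL, List.filter_map]
    congr 1
    apply List.filter_congr
    intro q _
    exact (even_test_eq n q hpre').symm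
  rw [hfilt, ← hkey]
  rw [hcand, sortTR_eq_sorted, hfind]
  rcases hsel1 : selFirstMin key (L.filter p) with _ | m1
  · rcases hsel2 : selFirstMin key L with _ | m2
    · have hLnil := (selFirstMin_eq_none_iff key L).mp hsel2
      rw [hLnil]
      simp [PySem.List.sorted]
    · rw [hsel2] at hhead
      rcases hs : PySem.List.sorted L key false with _ | ⟨c, t⟩
      · have : L = [] := (PySem.List.sorted_eq_nil_iff L key false).mp hs
        rw [this] at hsel2
        simp [selFirstMin] at hsel2
      · have hcm : c = m2 := by
          rw [hs] at hhead
          simpa [List.find?] using hhead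
        simp [hcm]
  · simp
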